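-- pv_equiv track=rewrite | github.com/wanling131/SmartVocab | core/recommendation/recommendation_engine.py | _determine_primary_algorithm
-- ===== SOURCE A (Python) =====
-- def _determine_primary_algorithm(sources: list) -> str:
--     """
--     确定主要算法类型
--
--     Args:
--         sources: 推荐来源列表
--
--     Returns:
--         主要算法类型
--     """
--     if not sources:
--         return "mixed"
--
--     # 优先级排序
--     priority = [
--         "deep_learning",
--         "collaborative",
--         "history",
--         "frequency",
--         "difficulty",
--         "random",
--     ]
--
--     source_count = {}
--     for source in sources:
--         source_count[source] = source_count.get(source, 0) + 1
--
--     # 按优先级和出现次数确定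
--     for algo in priority:
--         if algo in source_count:
--             return algo
--
--     return sources[0] if sources else "mixed"
-- ===== SOURCE B (Python) =====
-- def _determine_primary_algorithm(sources: list) -> str:
--     if not sources:
--         return "mixed"
--     rank = {algo: i for i, algo in enumerate([
--         "deep_learning",
--         "collaborative",
--         "history",
--         "frequency",
--         "difficulty",
--         "random",
--     ])}
--     best_rank = None
--     best_algo = None
--     for s in sources:
--         r = rank.get(s)
--         if r is not None and (best_rank is None or r < best_rank):
--             best_rank = r
--             best_algo = s
--     return best_algo if best_algo is not None else sources[0]
-- ===== Notes on version B (the rewrite author's own statement) =====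
-- stated objective: alternative
-- what changed: Instead of counting sources into a dict and then scanning the priority list for the first key present, B builds a rank index {algo: priority position} once and makes a single pass over sources keeping the minimum-rank source seen, falling back to sources[0] when no source is ranked.
import Mathlib
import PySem

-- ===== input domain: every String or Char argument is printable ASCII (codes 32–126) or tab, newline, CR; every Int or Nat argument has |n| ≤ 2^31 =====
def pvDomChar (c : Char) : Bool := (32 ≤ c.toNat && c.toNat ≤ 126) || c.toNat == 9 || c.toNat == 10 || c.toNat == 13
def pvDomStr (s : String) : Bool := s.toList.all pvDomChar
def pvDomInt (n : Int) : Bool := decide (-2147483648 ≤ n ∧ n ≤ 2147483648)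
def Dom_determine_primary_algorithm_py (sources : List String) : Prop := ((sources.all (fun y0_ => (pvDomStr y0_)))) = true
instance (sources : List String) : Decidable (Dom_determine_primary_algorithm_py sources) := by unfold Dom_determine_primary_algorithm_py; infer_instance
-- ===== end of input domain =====

-- B builds a rank index over the fixed priority list and keeps the minimum-rank source in one
-- pass over sources, instead of A's counting dict scanned priority-by-priority (alternative decomposition).

-- ===== PORT A =====
def pvPriorityA : List String :=
  ["deep_learning", "collaborative", "history", "frequency", "difficulty", "random"]

-- A's second loop: return the first priority algo contained in the counting dict
def pvFindA (algos : List String) (source_count : PySem.Dict String Int) : Option String :=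
  match algos with
  | [] => none
  | a :: rest => if source_count.contains a then some a else pvFindA rest source_count

def determine_primary_algorithm_py (sources : List String) : String :=
  if sources = [] then "mixed"
  else
    let source_count := sources.foldl (fun d s => d.insert s (d.getD s 0 + 1)) PySem.Dict.empty
    match pvFindA pvPriorityA source_count with
    | some a => a
    | none =>
      if sources ≠ [] then
        match PySem.List.pyGet? sources 0 with
        | some x => x
        | none => "mixed"   -- unreachable: sources ≠ []
      else "mixed"

-- ===== PORT B =====
def pvRankB : PySem.Dict String Int :=
  PySem.Dict.ofList [("deep_learning", 0), ("collaborative", 1), ("history", 2),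
                     ("frequency", 3), ("difficulty", 4), ("random", 5)]

def determine_primary_algorithm_py_alt (sources : List String) : String :=
  if sources = [] then "mixed"
  else
    let best := sources.foldl (fun (best : Option (Int × String)) s =>
      match pvRankB.get? s with
      | none => best
      | some r =>
        match best with
        | none => some (r, s)
        | some (r0, _) => if r < r0 then some (r, s) else best) none
    match best with
    | some (_, a) => a
    | none =>
      match PySem.List.pyGet? sources 0 with
      | some x => x
      | none => "mixed"   -- unreachable: sources ≠ []

-- ===== PRECONDITION & SPEC =====
def Spec_determine_primary_algorithm_py (sources : List String) (out : String) : Prop := out = determine_primary_algorithm_py_alt sources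
instance (sources : List String) (out : String) : Decidable (Spec_determine_primary_algorithm_py sources out) := by unfold Spec_determine_primary_algorithm_py; infer_instance

-- ===== CLAIM (what is proved, stated in full; the proofs are below) =====
def Claim_equal_determine_primary_algorithm_py : Prop := ∀ (sources : List String), Dom_determine_primary_algorithm_py sources → Spec_determine_primary_algorithm_py sources (determine_primary_algorithm_py sources)

-- ===== LEMMAS AND PROOFS =====

-- rank of a string in the priority list, as nested ifs (mirrors pvRankB.get?)
def pvRho (s : String) : Option Nat :=
  if s = "deep_learning" then some 0
  else if s = "collaborative" then some 1
  else if s = "history" then some 2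
  else if s = "frequency" then some 3
  else if s = "difficulty" then some 4
  else if s = "random" then some 5
  else none

-- priority string at a rank (total)
def pvPr (r : Nat) : String := pvPriorityA.getD r ""

-- min of two optional ranks
def pvOmin : Option Nat → Option Nat → Option Nat
  | none, b => b
  | some a, none => some a
  | some a, some b => some (min a b)

-- rank of the highest-priority algorithm present in l
def pvF (l : List String) : Option Nat :=
  if "deep_learning" ∈ l then some 0
  else if "collaborative" ∈ l then some 1
  else if "history" ∈ l then some 2
  else if "frequency" ∈ l then some 3
  else if "difficulty" ∈ l then some 4
  else if "random" ∈ l then some 5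
  else none

def pvEnc (o : Option Nat) : Option (Int × String) :=
  o.map (fun (r : Nat) => ((r : Int), pvPr r))

set_option maxRecDepth 4000 in
lemma pvRank_get (s : String) : pvRankB.get? s = (pvRho s).map (fun n : Nat => (n : Int)) := by
  have h : pvRankB.items = [("deep_learning", 0), ("collaborative", 1), ("history", 2),
      ("frequency", 3), ("difficulty", 4), ("random", 5)] := by decide
  unfold pvRho
  simp only [PySem.Dict.get?, h, List.find?]
  split_ifs with h1 h2 h3 h4 h5 h6
  · simp_all
  · simp_all
  · simp_all
  · simp_all
  · simp_all
  · simp_all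
  · simp only [beq_eq_false_iff_ne.mpr (Ne.symm h1),
      beq_eq_false_iff_ne.mpr (Ne.symm h2),
      beq_eq_false_iff_ne.mpr (Ne.symm h3),
      beq_eq_false_iff_ne.mpr (Ne.symm h4),
      beq_eq_false_iff_ne.mpr (Ne.symm h5),
      beq_eq_false_iff_ne.mpr (Ne.symm h6), Option.map_none]

lemma pvRho_pr {s : String} {r : Nat} (ho : pvRho s = some r) : s = pvPr r := by
  unfold pvRho at ho
  split_ifs at ho
  all_goals exact Option.some.inj ho ▸ (by subst_vars; rfl)

lemma pvStep_enc (o : Option Nat) (s : String) :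
    (match pvRankB.get? s with
      | none => pvEnc o
      | some r =>
        match pvEnc o with
        | none => some (r, s)
        | some (r0, _) => if r < r0 then some (r, s) else pvEnc o)
    = pvEnc (pvOmin o (pvRho s)) := by
  rw [pvRank_get]
  cases ho : pvRho s with
  | none => cases o <;> simp [pvEnc, pvOmin]
  | some r =>
    have hs : s = pvPr r := pvRho_pr ho
    cases o with
    | none => simp [pvEnc, pvOmin, hs]
    | some r0 =>
      simp only [pvEnc, pvOmin, Option.map_some]
      by_cases hlt : r < r0
      · have hc : (r : Int) < (r0 : Int) := by exact_mod_cast hlt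
        rw [if_pos hc]
        simp [hs, Nat.min_eq_right hlt.le]
      · have hc : ¬ (r : Int) < (r0 : Int) := by exact_mod_cast hlt
        rw [if_neg hc]
        simp [Nat.min_eq_left (Nat.le_of_not_lt hlt)]

lemma pvFold_enc (l : List String) (o : Option Nat) :
    l.foldl (fun (best : Option (Int × String)) s =>
      match pvRankB.get? s with
      | none => best
      | some r =>
        match best with
        | none => some (r, s)
        | some (r0, _) => if r < r0 then some (r, s) else best) (pvEnc o)
    = pvEnc (l.foldl (fun o s => pvOmin o (pvRho s)) o) := by
  induction l generalizing o with
  | nil => rfl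
  | cons s t ih =>
    simp only [List.foldl_cons]
    rw [pvStep_enc o s]
    exact ih _

lemma pvOmin_assoc (a b c : Option Nat) : pvOmin (pvOmin a b) c = pvOmin a (pvOmin b c) := by
  cases a <;> cases b <;> cases c <;> simp [pvOmin, Nat.min_assoc]

set_option maxHeartbeats 1000000 in
lemma pvF_cons (s : String) (t : List String) : pvF (s :: t) = pvOmin (pvRho s) (pvF t) := by
  unfold pvRho
  split_ifs with h1 h2 h3 h4 h5 h6 <;>
    (try subst_vars) <;>
    simp only [pvF, pvOmin, List.mem_cons] <;>
    split_ifs <;> simp_all [eq_comm]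

lemma pvM_eq_F (l : List String) (o : Option Nat) :
    l.foldl (fun o s => pvOmin o (pvRho s)) o = pvOmin o (pvF l) := by
  induction l generalizing o with
  | nil => cases o <;> rfl
  | cons s t ih =>
    simp only [List.foldl_cons]
    rw [ih, pvF_cons]
    exact pvOmin_assoc _ _ _

lemma pvFindA_eq_F (l : List String) :
    pvFindA pvPriorityA (PySem.Dict.counter l) = (pvF l).map pvPr := by
  simp only [pvPriorityA, pvFindA, PySem.Dict.contains_counter, pvF]
  split_ifs <;> simp_all [pvPr, pvPriorityA]

-- ===== VERDICT (by name: the statement is the Claim_ definition above) =====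
theorem determine_primary_algorithm_py_spec : Claim_equal_determine_primary_algorithm_py := by
  intro sources _
  unfold Spec_determine_primary_algorithm_py
  unfold determine_primary_algorithm_py determine_primary_algorithm_py_alt
  by_cases h : sources = []
  · simp [h]
  · rw [if_neg h, if_neg h]
    have hfold := pvFold_enc sources none
    simp only [pvEnc, Option.map_none] at hfold
    simp only [PySem.Dict.foldl_insert_getD_add_one_eq_counter, pvFindA_eq_F, hfold,
      pvM_eq_F]
    cases hF : pvF sources with
    | none => simp [pvOmin, h]
    | some r => simp [pvOmin]
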